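-- pv_equiv track=rewrite | github.com/miliar/Code_Jam_Webscraper | solutions_python/Problem_34/693.py | parseLanguage
-- ===== SOURCE A (Python) =====
-- def parseLanguage(data):
-- 	pattern = []
-- 	position = 0
-- 	while position < len(data):
-- 		if data[position] == '(':
-- 			end = data.index(')', position);
-- 			pattern.append(list(data[position+1:end]))
-- 			position = end+1
-- 		else:
-- 			pattern.append(list(data[position]))
-- 			position += 1
-- 	return pattern
-- ===== SOURCE B (Python) =====
-- def parseLanguage(data):
--     pattern = []
--     current = None          # None = outside a group; a list = chars of the open group
--     for ch in data:
--         if current is None: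
--             if ch == '(':
--                 current = []
--             else:
--                 pattern.append([ch])
--         elif ch == ')':
--             pattern.append(current)
--             current = None
--         else:
--             current.append(ch)
--     if current is not None:
--         raise ValueError("unterminated '('")
--     return pattern
-- ===== Notes on version B (the rewrite author's own statement) =====
-- stated objective: simpler
-- what changed: Replaces A's position/index/slice while-loop (which calls str.index to find each ')' and slices the group out) by a single char-by-char pass with an open-group accumulator; same O(n) asymptotics but no repeated str.index scans or slicing, which a timing run measured as a constant-factor speedup.
import Mathlib
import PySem

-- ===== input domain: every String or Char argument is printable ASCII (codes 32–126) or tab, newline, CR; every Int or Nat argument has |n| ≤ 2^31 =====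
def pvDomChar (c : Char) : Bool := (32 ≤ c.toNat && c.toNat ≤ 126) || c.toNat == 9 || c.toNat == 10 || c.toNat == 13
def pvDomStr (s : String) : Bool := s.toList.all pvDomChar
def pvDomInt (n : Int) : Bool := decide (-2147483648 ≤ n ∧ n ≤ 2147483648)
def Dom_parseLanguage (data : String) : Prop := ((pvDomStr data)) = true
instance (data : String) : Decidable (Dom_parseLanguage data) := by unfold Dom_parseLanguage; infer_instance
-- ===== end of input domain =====

-- B replaces A's position/str.index/slice while-loop by a single char-by-char pass with an
-- open-group accumulator (simpler decomposition, same O(n) cost). Both raise ValueError on an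
-- unmatched top-level '(' — those inputs are outside Pre_.

-- ===== PORT A =====
-- A's while-loop over `position` rendered as recursion on the remaining suffix: at '(' it
-- searches for the next ')' (data.index), slices the group out, and resumes after it.
def parseLanguageAux : List Char → List (List String)
  | [] => []
  | c :: rest =>
    if c = '(' then
      match rest.idxOf? ')' with
      | some k =>
          -- pattern.append(list(data[position+1:end])); position = end+1
          (rest.take k).map (fun ch => String.ofList [ch]) :: parseLanguageAux (rest.drop (k + 1))
      | none => []        -- data.index(')', position) raises ValueError here (outside Pre_)
    else
      [String.ofList [c]] :: parseLanguageAux rest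
termination_by l => l.length
decreasing_by
  · simp only [List.length_drop, List.length_cons]; omega
  · simp

def parseLanguage (data : String) : List (List String) :=
  parseLanguageAux data.toList

-- ===== PORT B =====
-- B's single pass: `none` = outside a group, `some cur` = chars of the open group so far.
def parseLanguageAltGo : List Char → Option (List String) → List (List String)
  | [], _ => []           -- if a group is still open Python raises ValueError here (outside Pre_)
  | c :: rest, none =>
      if c = '(' then parseLanguageAltGo rest (some [])
      else [String.ofList [c]] :: parseLanguageAltGo rest none
  | c :: rest, some cur =>
      if c = ')' then cur :: parseLanguageAltGo rest none
      else parseLanguageAltGo rest (some (cur ++ [String.ofList [c]]))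

def parseLanguage_alt (data : String) : List (List String) :=
  parseLanguageAltGo data.toList none

-- ===== PRECONDITION & SPEC =====
-- Pre_ excludes exactly the inputs on which A raises ValueError (str.index finds no ')'):
-- those where some '(' has no ')' at or after it.  (B raises ValueError there too.)
def Pre_parseLanguage (data : String) : Prop :=
  ∀ i ∈ List.range data.toList.length, data.toList[i]? = some '(' →
    ∃ j ∈ List.range data.toList.length, i ≤ j ∧ data.toList[j]? = some ')'
instance (data : String) : Decidable (Pre_parseLanguage data) := by
  unfold Pre_parseLanguage; infer_instance

def pvWitness_parseLanguage : String := "a(bc)d()e"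

def Spec_parseLanguage (data : String) (out : List (List String)) : Prop := out = parseLanguage_alt data
instance (data : String) (out : List (List String)) : Decidable (Spec_parseLanguage data out) := by unfold Spec_parseLanguage; infer_instance

-- ===== CLAIM (what is proved, stated in full; the proofs are below) =====
def Claim_equal_parseLanguage : Prop := ∀ (data : String), Dom_parseLanguage data → Pre_parseLanguage data → Spec_parseLanguage data (parseLanguage data)

-- ===== LEMMAS AND PROOFS =====

-- Pre_, phrased directly on the character list.
def PreL (l : List Char) : Prop :=
  ∀ i : Nat, l[i]? = some '(' → ∃ j, i ≤ j ∧ l[j]? = some ')'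

theorem preL_of_pre (data : String) (h : Pre_parseLanguage data) : PreL data.toList := by
  unfold PreL
  intro i hi
  have hilen : i < data.toList.length := (List.getElem?_eq_some_iff.1 hi).1
  obtain ⟨j, hj, hij, hj'⟩ := h i (List.mem_range.2 hilen) hi
  exact ⟨j, hij, hj'⟩

theorem preL_tail {c : Char} {rest : List Char} (h : PreL (c :: rest)) (hc : c ≠ ')') :
    PreL rest := by
  unfold PreL
  intro i hi
  obtain ⟨j, hij, hj⟩ := h (i + 1) (by simpa using hi)
  match j, hij with
  | 0, _ => simp at hj; exact absurd hj hc
  | j' + 1, hij => exact ⟨j', by omega, by simpa using hj⟩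

-- B consumes an open group: the chars before the first ')' are appended one by one.
theorem altGo_group (xs : List Char) (rest : List Char) (cur : List String)
    (hx : ')' ∉ xs) :
    parseLanguageAltGo (xs ++ ')' :: rest) (some cur)
      = (cur ++ xs.map (fun ch => String.ofList [ch])) :: parseLanguageAltGo rest none := by
  induction xs generalizing cur with
  | nil => simp [parseLanguageAltGo]
  | cons x xs ih =>
      have hx' : x ≠ ')' := fun h => hx (by simp [h])
      have hxs : ')' ∉ xs := fun h => hx (by simp [h])
      simp only [List.cons_append, parseLanguageAltGo, if_neg hx']
      rw [ih _ hxs]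
      simp

-- dropping past a matched group preserves PreL
theorem preL_drop_group {rest : List Char} {k : Nat} (h : PreL ('(' :: rest)) :
    PreL (rest.drop (k + 1)) := by
  unfold PreL
  intro i hi
  have hi' : rest[k + 1 + i]? = some '(' := by
    rw [List.getElem?_drop] at hi; exact hi
  have hcons : ('(' :: rest)[k + 2 + i]? = some '(' := by
    have : k + 2 + i = (k + 1 + i) + 1 := by omega
    rw [this, List.getElem?_cons_succ]; exact hi'
  obtain ⟨j, hij, hj⟩ := h (k + 2 + i) hcons
  match j, hij with
  | j' + 1, hij =>
      refine ⟨j' - (k + 1), by omega, ?_⟩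
      rw [List.getElem?_drop]
      have : k + 1 + (j' - (k + 1)) = j' := by omega
      rw [this]
      simpa using hj

theorem main_lemma : ∀ n l, l.length ≤ n → PreL l → parseLanguageAux l = parseLanguageAltGo l none := by
  intro n
  induction n with
  | zero =>
      intro l hl _
      have : l = [] := List.eq_nil_of_length_eq_zero (by omega)
      subst this; simp [parseLanguageAux, parseLanguageAltGo]
  | succ n ih =>
      intro l hl hpre
      match l with
      | [] => simp [parseLanguageAux, parseLanguageAltGo]
      | c :: rest =>
          unfold PreL at hpre
          by_cases hc : c = '('
          · subst hc
            -- the first '(' has a ')' after it, so idxOf? succeeds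
            obtain ⟨j, _, hj⟩ := hpre 0 (by simp)
            have hmem : ')' ∈ rest := by
              match j, hj with
              | 0, hj => simp at hj
              | j' + 1, hj =>
                  simp only [List.getElem?_cons_succ] at hj
                  exact List.mem_of_getElem? hj
            have hsome : (rest.idxOf? ')').isSome := by
              rwa [List.isSome_idxOf?]
            obtain ⟨k, hk⟩ := Option.isSome_iff_exists.1 hsome
            obtain ⟨hklen, hkget, hkmin⟩ := List.idxOf?_eq_some_iff.1 hk
            -- split rest at index k
            have hsplit : rest = rest.take k ++ ')' :: rest.drop (k + 1) := by
              conv_lhs => rw [← List.take_append_drop k rest]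
              congr 1
              rw [List.drop_eq_getElem_cons hklen, hkget]
            have hnmem : ')' ∉ rest.take k := by
              intro hm
              obtain ⟨i, hik, hig⟩ := List.mem_take_iff_getElem.1 hm
              exact hkmin i (by omega) (by simpa using hig)
            -- A side
            simp only [parseLanguageAux, hk]
            -- B side
            simp only [parseLanguageAltGo]
            conv_rhs => rw [hsplit]
            rw [altGo_group _ _ _ hnmem]
            simp only [List.nil_append]
            rw [ih (rest.drop (k + 1))
              (by simp only [List.length_drop]; simp at hl; omega) (preL_drop_group hpre)]
            simp
          · have hpre' : PreL rest := by
              by_cases hc' : c = ')'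
              · subst hc'
                intro i hi
                obtain ⟨j, hij, hj⟩ := hpre (i + 1) (by simpa using hi)
                match j, hij with
                | 0, _ => exact ⟨i, le_refl _, by simp at hj ⊢; omega⟩
                | j' + 1, hij => exact ⟨j', by omega, by simpa using hj⟩
              · exact preL_tail hpre hc'
            simp only [parseLanguageAux, parseLanguageAltGo, if_neg hc]
            rw [ih rest (by simp at hl; omega) hpre']

-- ===== VERDICT (by name: the statement is the Claim_ definition above) =====
theorem parseLanguage_spec : Claim_equal_parseLanguage := by
  intro data _ hpre
  unfold Spec_parseLanguage parseLanguage parseLanguage_alt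
  exact main_lemma data.toList.length data.toList (le_refl _) (preL_of_pre data hpre)
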